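-- pv_equiv track=rewrite | github.com/GenesisInc/bible-text | converter.py | sort_bible_data
-- ===== SOURCE A (Python) =====
-- def sort_bible_data(bible_data):
--     """Sort Bible data by book, chapter, and verse."""
--     book_order = [
--         "genesis",
--         "exodus",
--         "leviticus",
--         "numbers",
--         "deuteronomy",
--         "joshua",
--         "judges",
--         "ruth",
--         "1 samuel",
--         "2 samuel",
--         "1 kings",
--         "2 kings",
--         "1 chronicles",
--         "2 chronicles",
--         "ezra",
--         "nehemiah",
--         "esther",
--         "job",
--         "psalms",
--         "proverbs",
--         "ecclesiastes",
--         "song of solomon",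
--         "isaiah",
--         "jeremiah",
--         "lamentations",
--         "ezekiel",
--         "daniel",
--         "hosea",
--         "joel",
--         "amos",
--         "obadiah",
--         "jonah",
--         "micah",
--         "nahum",
--         "habakkuk",
--         "zephaniah",
--         "haggai",
--         "zechariah",
--         "malachi",
--         "matthew",
--         "mark",
--         "luke",
--         "john",
--         "acts",
--         "romans",
--         "1 corinthians",
--         "2 corinthians",
--         "galatians",
--         "ephesians",
--         "philippians",
--         "colossians",
--         "1 thessalonians",
--         "2 thessalonians",
--         "1 timothy",
--         "2 timothy",
--         "titus",
--         "philemon",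
--         "hebrews",
--         "james",
--         "1 peter",
--         "2 peter",
--         "1 john",
--         "2 john",
--         "3 john",
--         "jude",
--         "revelation",
--     ]
--
--     sorted_books = {}
--
--     # Sort books based on predefined order
--     for book in book_order:
--         if book not in bible_data:
--             continue
--
--         chapters = bible_data[book]
--         sorted_chapters = {}
--
--         # Sort chapters numerically
--         for chapter_key in sorted(
--             (key for key in chapters.keys() if key.isdigit()), key=lambda x: int(x)
--         ):
--             if chapter_key not in chapters:
--                 continue
--
--             verses = chapters[chapter_key]
--             sorted_verses = {
--                 str(verse): verses[str(verse)]
--                 for verse in sorted(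
--                     (int(v) for v in verses.keys() if v.isdigit()), key=int
--                 )
--             }
--             sorted_chapters[chapter_key] = sorted_verses
--
--         sorted_books[book] = sorted_chapters
--
--     return sorted_books
-- ===== SOURCE B (Python) =====
-- def sort_bible_data(bible_data):
--     """Sort Bible data by book, chapter, and verse."""
--     book_order = [
--         "genesis", "exodus", "leviticus", "numbers", "deuteronomy",
--         "joshua", "judges", "ruth", "1 samuel", "2 samuel",
--         "1 kings", "2 kings", "1 chronicles", "2 chronicles", "ezra",
--         "nehemiah", "esther", "job", "psalms", "proverbs",
--         "ecclesiastes", "song of solomon", "isaiah", "jeremiah",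
--         "lamentations", "ezekiel", "daniel", "hosea", "joel", "amos",
--         "obadiah", "jonah", "micah", "nahum", "habakkuk", "zephaniah",
--         "haggai", "zechariah", "malachi", "matthew", "mark", "luke",
--         "john", "acts", "romans", "1 corinthians", "2 corinthians",
--         "galatians", "ephesians", "philippians", "colossians",
--         "1 thessalonians", "2 thessalonians", "1 timothy", "2 timothy",
--         "titus", "philemon", "hebrews", "james", "1 peter", "2 peter",
--         "1 john", "2 john", "3 john", "jude", "revelation",
--     ]
--     rank = {name: i for i, name in enumerate(book_order)}
--
--     # Bucket placement: one pass over the input drops each recognised book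
--     # into its canonical slot; no comparison sort and no membership scans.
--     slots = [None] * len(book_order)
--     for book, chapters in bible_data.items():
--         i = rank.get(book)
--         if i is not None:
--             slots[i] = (book, chapters)
--
--     # Emit the occupied slots in canonical order; chapters and verses are
--     # decorate-sorted as ITEMS by the integer value of their key, so the
--     # dict is rebuilt directly from the sorted pairs without re-indexing.
--     result = {}
--     for slot in slots:
--         if slot is None:
--             continue
--         book, chapters = slot
--         result[book] = {
--             ck: dict(sorted(((v, t) for v, t in cvs.items() if v.isdigit()),
--                             key=lambda kv: int(kv[0])))
--             for ck, cvs in sorted(((k, c) for k, c in chapters.items() if k.isdigit()),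
--                                   key=lambda kv: int(kv[0]))
--         }
--     return result
-- ===== Notes on version B (the rewrite author's own statement) =====
-- stated objective: alternative
-- what changed: B replaces A's walk over all 66 canonical names with membership lookups by a bucket placement (one pass dropping each input book into its canonical slot, then a scan of the slots), and replaces A's sort-keys-then-reindex-the-dict passes at chapter and verse level by decorate-sorting the items themselves, so the result dicts are rebuilt straight from sorted pairs with no dict lookups and no str(int(v)) key rebuild.
-- outside the precondition, e.g. on sort_bible_data({'genesis': {'1': {'01': 'a'}}}): A raises KeyError, B returns {'genesis': {'1': {'01': 'a'}}}
import Mathlib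
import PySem

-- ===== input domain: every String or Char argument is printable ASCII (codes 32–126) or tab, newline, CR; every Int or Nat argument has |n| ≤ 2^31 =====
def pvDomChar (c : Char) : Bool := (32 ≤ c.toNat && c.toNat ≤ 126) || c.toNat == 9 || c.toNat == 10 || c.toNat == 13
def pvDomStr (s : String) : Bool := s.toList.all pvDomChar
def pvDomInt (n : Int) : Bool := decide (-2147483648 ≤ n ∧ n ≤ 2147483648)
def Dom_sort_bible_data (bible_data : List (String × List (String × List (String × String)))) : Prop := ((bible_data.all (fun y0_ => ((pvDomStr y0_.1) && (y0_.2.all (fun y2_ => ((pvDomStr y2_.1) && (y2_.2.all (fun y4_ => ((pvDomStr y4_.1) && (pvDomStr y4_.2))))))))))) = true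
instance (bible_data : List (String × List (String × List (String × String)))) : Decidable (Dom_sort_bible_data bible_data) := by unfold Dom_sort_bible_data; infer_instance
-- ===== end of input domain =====

-- B replaces A's scan of all 66 canonical names with a one-pass bucket placement into canonical
-- slots, and rebuilds chapter/verse dicts directly from decorate-sorted ITEMS (no dict re-indexing,
-- no str(int(v)) key rebuild); objective: alternative, same return value on Pre_.

-- ===== PORT A =====
-- the book_order constant of the Python source (shared verbatim by both versions)
def pyBookOrder : List String := ["genesis","exodus","leviticus","numbers","deuteronomy","joshua","judges","ruth","1 samuel","2 samuel","1 kings","2 kings","1 chronicles","2 chronicles","ezra","nehemiah","esther","job","psalms","proverbs","ecclesiastes","song of solomon","isaiah","jeremiah","lamentations","ezekiel","daniel","hosea","joel","amos","obadiah","jonah","micah","nahum","habakkuk","zephaniah","haggai","zechariah","malachi","matthew","mark","luke","john","acts","romans","1 corinthians","2 corinthians","galatians","ephesians","philippians","colossians","1 thessalonians","2 thessalonians","1 timothy","2 timothy","titus","philemon","hebrews","james","1 peter","2 peter","1 john","2 john","3 john","jude","revelation"]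

-- {str(verse): verses[str(verse)] for verse in sorted((int(v) for v in verses if v.isdigit()), key=int)}
-- key=int applied to an int is that int, ported as (fun n => n); verses[str(verse)] raises KeyError
-- when str(verse) is missing (leading-zero keys) — those inputs are outside Pre_, ported total as .getD "".
def pvSortVersesA (verses : PySem.Dict String String) : List (String × String) :=
  ((PySem.List.sorted ((verses.keys.filter (fun v => PySem.Str.strIsdigit v)).map
        (fun v => (PySem.Int.ofStr? v).getD 0)) (fun n => n)).foldl
    (fun d n => d.insert (PySem.Int.toStr n) ((verses.get? (PySem.Int.toStr n)).getD ""))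
    PySem.Dict.empty).items

-- the body of A's outer loop: chapter loop with its redundant 'if chapter_key not in chapters: continue'
def pvSortChaptersA (chapters : PySem.Dict String (List (String × String))) : List (String × List (String × String)) :=
  ((PySem.List.sorted (chapters.keys.filter (fun k => PySem.Str.strIsdigit k))
        (fun x => (PySem.Int.ofStr? x).getD 0)).foldl
    (fun d ck =>
      if chapters.contains ck then
        d.insert ck (pvSortVersesA (PySem.Dict.mk ((chapters.get? ck).getD [])))
      else d)
    PySem.Dict.empty).items

def sort_bible_data (bible_data : List (String × List (String × List (String × String)))) : List (String × List (String × List (String × String))) :=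
  (pyBookOrder.foldl (fun acc book =>
      if (PySem.Dict.mk bible_data).contains book then
        acc.insert book (pvSortChaptersA (PySem.Dict.mk (((PySem.Dict.mk bible_data).get? book).getD [])))
      else acc)
    PySem.Dict.empty).items

-- ===== PORT B =====
-- rank = {name: i for i, name in enumerate(book_order)}
def pvBookRank : PySem.Dict String Int :=
  (PySem.List.enumerate pyBookOrder).foldl (fun d p => d.insert p.2 p.1) PySem.Dict.empty

-- dict(sorted(((v, t) for v, t in cvs.items() if v.isdigit()), key=lambda kv: int(kv[0])))
def pvSortVersesB (cvs : List (String × String)) : List (String × String) :=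
  (PySem.Dict.ofList (PySem.List.sorted (cvs.filter (fun kv => PySem.Str.strIsdigit kv.1))
      (fun kv => (PySem.Int.ofStr? kv.1).getD 0))).items

-- {ck: … for ck, cvs in sorted(((k, c) for k, c in chapters.items() if k.isdigit()), key=…)}
def pvSortChaptersB (chapters : List (String × List (String × String))) : List (String × List (String × String)) :=
  ((PySem.List.sorted (chapters.filter (fun kv => PySem.Str.strIsdigit kv.1))
      (fun kv => (PySem.Int.ofStr? kv.1).getD 0)).foldl
    (fun (d : PySem.Dict String (List (String × String))) kv => d.insert kv.1 (pvSortVersesB kv.2))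
    PySem.Dict.empty).items

-- for book, chapters in bible_data.items(): i = rank.get(book); if i is not None: slots[i] = (book, chapters)
def pvBucketStep (slots : List (Option (String × List (String × List (String × String)))))
    (p : String × List (String × List (String × String))) :
    List (Option (String × List (String × List (String × String)))) :=
  match pvBookRank.get? p.1 with
  | some i => slots.set i.toNat (some p)
  | none => slots

def sort_bible_data_alt (bible_data : List (String × List (String × List (String × String)))) : List (String × List (String × List (String × String))) :=
  ((bible_data.foldl pvBucketStep (List.replicate pyBookOrder.length none)).foldl
    (fun (acc : PySem.Dict String (List (String × List (String × String)))) slot =>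
      match slot with
      | some p => acc.insert p.1 (pvSortChaptersB p.2)
      | none => acc)
    PySem.Dict.empty).items

-- ===== PRECONDITION & SPEC =====
-- Pre_ excludes (a) association lists with duplicate keys at some level, which cannot arise from a
-- Python dict, and (b) inputs where a processed verse dict (book in canonical order, digit chapter
-- key) has a digit verse key with leading zeros: there A keys the rebuilt dict by str(int(v)), so it
-- raises KeyError when that canonical key is absent and silently collapses entries when present —
-- an accidental corner of rebuilding keys that no caller would specify.
def Pre_sort_bible_data (bible_data : List (String × List (String × List (String × String)))) : Prop :=
  (bible_data.map Prod.fst).Nodup ∧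
  ∀ be ∈ bible_data, be.1 ∈ pyBookOrder →
    (be.2.map Prod.fst).Nodup ∧
    ∀ ce ∈ be.2, PySem.Str.strIsdigit ce.1 = true →
      (ce.2.map Prod.fst).Nodup ∧
      ∀ ve ∈ ce.2, PySem.Str.strIsdigit ve.1 = true →
        PySem.Int.toStr ((PySem.Int.ofStr? ve.1).getD 0) = ve.1
instance (bible_data : List (String × List (String × List (String × String)))) : Decidable (Pre_sort_bible_data bible_data) := by unfold Pre_sort_bible_data; infer_instance

def pvWitness_sort_bible_data : (List (String × List (String × List (String × String)))) :=
  [("genesis", [("2", [("3", "In the beginning"), ("1", "was")])]), ("exodus", [("1", [("1", "x")])])]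

def Spec_sort_bible_data (bible_data : List (String × List (String × List (String × String)))) (out : List (String × List (String × List (String × String)))) : Prop := out = sort_bible_data_alt bible_data
instance (bible_data : List (String × List (String × List (String × String)))) (out : List (String × List (String × List (String × String)))) : Decidable (Spec_sort_bible_data bible_data out) := by unfold Spec_sort_bible_data; infer_instance

-- ===== CLAIM (what is proved, stated in full; the proofs are below) =====
def Claim_equal_sort_bible_data : Prop := ∀ (bible_data : List (String × List (String × List (String × String)))), Dom_sort_bible_data bible_data → Pre_sort_bible_data bible_data → Spec_sort_bible_data bible_data (sort_bible_data bible_data)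

-- ===== LEMMAS AND PROOFS =====

set_option maxRecDepth 200000
set_option maxHeartbeats 2000000

theorem pvBookOrder_nodup : pyBookOrder.Nodup := by decide

-- every value pvBookRank stores points back at its key's position in pyBookOrder
theorem pvRank_sound (s : String) (j : Int) (h : pvBookRank.get? s = some j) :
    0 ≤ j ∧ j.toNat < pyBookOrder.length ∧ pyBookOrder[j.toNat]! = s := by
  have hall : ∀ p ∈ pvBookRank.items,
      0 ≤ p.2 ∧ p.2.toNat < pyBookOrder.length ∧ pyBookOrder[p.2.toNat]! = p.1 := by decide
  exact hall _ (PySem.Dict.mem_items_of_get?_eq_some _ h)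

theorem pvRank_complete : ∀ b ∈ pyBookOrder, pvBookRank.contains b = true := by decide

theorem pvBucket_length (xs : List (String × List (String × List (String × String))))
    (slots : List (Option (String × List (String × List (String × String))))) :
    (xs.foldl pvBucketStep slots).length = slots.length := by
  induction xs generalizing slots with
  | nil => rfl
  | cons p t ih =>
      simp only [List.foldl_cons]
      rw [ih]
      unfold pvBucketStep
      cases pvBookRank.get? p.1 <;> simp

-- the bucket pass fills slot i with the input entry for pyBookOrder[i], if any
theorem pvBucket_get (xs : List (String × List (String × List (String × String))))
    (hnd : (xs.map Prod.fst).Nodup)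
    (slots : List (Option (String × List (String × List (String × String)))))
    (hlen : slots.length = pyBookOrder.length) (i : Nat) (hi : i < pyBookOrder.length) :
    (xs.foldl pvBucketStep slots)[i]? =
      match (PySem.Dict.mk xs).get? pyBookOrder[i] with
      | some cs => some (some (pyBookOrder[i], cs))
      | none => slots[i]? := by
  induction xs generalizing slots with
  | nil =>
      have hnone : (PySem.Dict.mk ([] : List (String × List (String × List (String × String))))).get? pyBookOrder[i] = none := by
        rw [PySem.Dict.get?_eq_none_iff_not_mem_keys]; simp [PySem.Dict.keys]
      simp [hnone]
  | cons p t ih =>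
      simp only [List.foldl_cons]
      have hnd' : (t.map Prod.fst).Nodup := (List.nodup_cons.mp hnd).2
      have hnotmem : p.1 ∉ t.map Prod.fst := (List.nodup_cons.mp hnd).1
      rcases hr : pvBookRank.get? p.1 with _ | j
      · -- book not canonical: slot untouched, and p.1 ≠ pyBookOrder[i]
        have hstep : pvBucketStep slots p = slots := by unfold pvBucketStep; rw [hr]
        rw [hstep, ih hnd' slots hlen]
        have hne : (p.1 == pyBookOrder[i]) = false := by
          apply beq_false_of_ne
          intro hcontr
          have hc := pvRank_complete pyBookOrder[i] (List.getElem_mem hi)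
          rw [← hcontr, PySem.Dict.contains_eq_isSome_get?, hr] at hc
          simp at hc
        rw [show (PySem.Dict.mk (p :: t)).get? pyBookOrder[i]
              = if (p.1 == pyBookOrder[i]) = true then some p.2 else (PySem.Dict.mk t).get? pyBookOrder[i]
            from PySem.Dict.get?_mk_cons p.1 p.2 t pyBookOrder[i], hne]
        simp
      · -- book canonical with rank j
        obtain ⟨hj0, hjlt, hjeq⟩ := pvRank_sound p.1 j hr
        have hjeq' : pyBookOrder[j.toNat] = p.1 := by
          rw [← hjeq]; exact (getElem!_pos pyBookOrder j.toNat hjlt).symm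
        have hstep : pvBucketStep slots p = slots.set j.toNat (some p) := by
          unfold pvBucketStep; rw [hr]
        rw [hstep, ih hnd' _ (by simpa using hlen)]
        by_cases hcase : p.1 = pyBookOrder[i]
        · -- this entry owns slot i
          have hji : j.toNat = i := by
            have h1 : pyBookOrder[j.toNat]'hjlt = pyBookOrder[i]'hi := by rw [hjeq', hcase]
            exact pvBookOrder_nodup.getElem_inj_iff.mp h1
          have htn : (PySem.Dict.mk t).get? pyBookOrder[i] = none := by
            rw [PySem.Dict.get?_eq_none_iff_not_mem_keys]
            simpa [PySem.Dict.keys, ← hcase] using hnotmem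
          have hbeq : (p.1 == pyBookOrder[i]) = true := beq_iff_eq.mpr hcase
          rw [show (PySem.Dict.mk (p :: t)).get? pyBookOrder[i]
                = if (p.1 == pyBookOrder[i]) = true then some p.2 else (PySem.Dict.mk t).get? pyBookOrder[i]
              from PySem.Dict.get?_mk_cons p.1 p.2 t pyBookOrder[i], hbeq]
          rw [htn, hji]
          simp [List.getElem?_set_self (by omega : i < slots.length), ← hcase]
        · -- a different slot was written
          have hji : j.toNat ≠ i := by
            intro hcontr; subst hcontr; exact hcase hjeq'.symm
          have hbeq : (p.1 == pyBookOrder[i]) = false := beq_false_of_ne hcase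
          rw [show (PySem.Dict.mk (p :: t)).get? pyBookOrder[i]
                = if (p.1 == pyBookOrder[i]) = true then some p.2 else (PySem.Dict.mk t).get? pyBookOrder[i]
              from PySem.Dict.get?_mk_cons p.1 p.2 t pyBookOrder[i], hbeq]
          rw [List.getElem?_set_ne hji]
          simp

-- a stable sort of mapped elements is the map of the sorted originals
theorem pv_insertBy_map {α β κ : Type} [LT κ] [DecidableLT κ] (f : α → β) (g : β → κ) (x : α) (acc : List α) :
    PySem.List.insertBy (fun a b => decide (g a < g b)) (f x) (acc.map f)
      = (PySem.List.insertBy (fun a b => decide (g (f a) < g (f b))) x acc).map f := by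
  induction acc with
  | nil => rfl
  | cons y ys ih =>
      simp only [List.map, PySem.List.insertBy]
      by_cases h : g (f x) < g (f y)
      · simp [h]
      · simp [h, ih]

theorem pv_sorted_map {α β κ : Type} [LT κ] [DecidableLT κ] (xs : List α) (f : α → β) (g : β → κ) :
    PySem.List.sorted (xs.map f) g = (PySem.List.sorted xs (fun a => g (f a))).map f := by
  rw [PySem.List.sorted_eq_foldl_insertBy, PySem.List.sorted_eq_foldl_insertBy, List.foldl_map]
  have : ∀ (acc : List α),
      xs.foldl (fun acc x => PySem.List.insertBy (fun a b => decide (g a < g b)) (f x) acc) (acc.map f)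
        = (xs.foldl (fun acc x => PySem.List.insertBy (fun a b => decide (g (f a) < g (f b))) x acc) acc).map f := by
    induction xs with
    | nil => intro acc; rfl
    | cons x t ih =>
        intro acc
        simp only [List.foldl_cons, pv_insertBy_map f g x acc, ih]
  simpa using this []

-- verse level: A's rebuild via str(int(v)) equals B's item sort, given canonical nodup digit keys
theorem pvSortVerses_eq (vs : List (String × String))
    (hnd : (vs.map Prod.fst).Nodup)
    (H : ∀ ve ∈ vs, PySem.Str.strIsdigit ve.1 = true →
        PySem.Int.toStr ((PySem.Int.ofStr? ve.1).getD 0) = ve.1) :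
    pvSortVersesA (PySem.Dict.mk vs) = pvSortVersesB vs := by
  unfold pvSortVersesA pvSortVersesB
  have hkeys : (PySem.Dict.mk vs).keys = vs.map Prod.fst := rfl
  rw [hkeys, List.filter_map, List.map_map,
      pv_sorted_map (vs.filter ((fun v => PySem.Str.strIsdigit v) ∘ Prod.fst))
        ((fun v => (PySem.Int.ofStr? v).getD 0) ∘ Prod.fst) (fun n => n),
      List.foldl_map]
  have hfilter : vs.filter ((fun v => PySem.Str.strIsdigit v) ∘ Prod.fst)
      = vs.filter (fun kv => PySem.Str.strIsdigit kv.1) := rfl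
  rw [hfilter]
  show _ = (PySem.Dict.ofList _).items
  have hofList : ∀ (l : List (String × String)), PySem.Dict.ofList l
      = l.foldl (fun (d : PySem.Dict String String) kv => d.insert kv.1 kv.2) PySem.Dict.empty :=
    fun _ => rfl
  rw [hofList]
  congr 1
  apply PySem.List.foldl_congr_mem
  intro acc kv hkv
  rw [PySem.List.mem_sorted] at hkv
  have hkv' := List.mem_filter.mp hkv
  have hdig : PySem.Str.strIsdigit kv.1 = true := hkv'.2
  have hround := H kv hkv'.1 hdig
  simp only [Function.comp]
  rw [hround]
  have hget : (PySem.Dict.mk vs).get? kv.1 = some kv.2 :=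
    PySem.Dict.get?_of_mem_items _ (by simpa using hkv'.1) (by rw [hkeys]; exact hnd)
  rw [hget]
  rfl

-- chapter level: sort-keys-then-index equals the item sort, given Pre_'s facts for this book
theorem pvSortChapters_eq (chs : List (String × List (String × String)))
    (hnd : (chs.map Prod.fst).Nodup)
    (H : ∀ ce ∈ chs, PySem.Str.strIsdigit ce.1 = true →
        (ce.2.map Prod.fst).Nodup ∧
        ∀ ve ∈ ce.2, PySem.Str.strIsdigit ve.1 = true →
          PySem.Int.toStr ((PySem.Int.ofStr? ve.1).getD 0) = ve.1) :
    pvSortChaptersA (PySem.Dict.mk chs) = pvSortChaptersB chs := by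
  unfold pvSortChaptersA pvSortChaptersB
  have hkeys : (PySem.Dict.mk chs).keys = chs.map Prod.fst := rfl
  rw [hkeys, List.filter_map,
      pv_sorted_map (chs.filter ((fun k => PySem.Str.strIsdigit k) ∘ Prod.fst))
        Prod.fst (fun x => (PySem.Int.ofStr? x).getD 0),
      List.foldl_map]
  have hfilter : chs.filter ((fun k => PySem.Str.strIsdigit k) ∘ Prod.fst)
      = chs.filter (fun kv => PySem.Str.strIsdigit kv.1) := rfl
  rw [hfilter]
  congr 1
  apply PySem.List.foldl_congr_mem
  intro acc kv hkv
  rw [PySem.List.mem_sorted] at hkv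
  have hkv' := List.mem_filter.mp hkv
  have hdig : PySem.Str.strIsdigit kv.1 = true := hkv'.2
  have hget : (PySem.Dict.mk chs).get? kv.1 = some kv.2 :=
    PySem.Dict.get?_of_mem_items _ (by simpa using hkv'.1) (by rw [hkeys]; exact hnd)
  have hcont : (PySem.Dict.mk chs).contains kv.1 = true := by
    rw [PySem.Dict.contains_eq_isSome_get?, hget]; rfl
  rw [hcont]
  simp only [if_true, hget, Option.getD_some]
  obtain ⟨hndv, Hv⟩ := H kv hkv'.1 hdig
  rw [pvSortVerses_eq kv.2 hndv Hv]

-- ===== VERDICT (by name: the statement is the Claim_ definition above) =====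
theorem sort_bible_data_spec : Claim_equal_sort_bible_data := by
  intro bible_data _hdom hpre
  obtain ⟨hnd1, H⟩ := hpre
  unfold Spec_sort_bible_data sort_bible_data sort_bible_data_alt
  have hslots : bible_data.foldl pvBucketStep (List.replicate pyBookOrder.length none)
      = pyBookOrder.map (fun b => ((PySem.Dict.mk bible_data).get? b).map (fun cs => (b, cs))) := by
    apply List.ext_getElem?
    intro i
    by_cases hi : i < pyBookOrder.length
    · rw [pvBucket_get bible_data hnd1 _ (by simp) i hi, List.getElem?_map,
          List.getElem?_eq_getElem hi]
      rcases h : (PySem.Dict.mk bible_data).get? pyBookOrder[i] with _ | cs <;>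
        simp [h, hi]
    · rw [List.getElem?_eq_none (by rw [pvBucket_length]; simpa using not_lt.mp hi),
          List.getElem?_eq_none (by simpa using not_lt.mp hi)]
  rw [hslots, List.foldl_map]
  congr 1
  apply PySem.List.foldl_congr_mem
  intro acc b hb
  rcases h : (PySem.Dict.mk bible_data).get? b with _ | cs
  · have hcont : (PySem.Dict.mk bible_data).contains b = false := by
      rw [PySem.Dict.contains_eq_isSome_get?, h]; rfl
    simp [hcont]
  · have hcont : (PySem.Dict.mk bible_data).contains b = true := by
      rw [PySem.Dict.contains_eq_isSome_get?, h]; rfl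
    have hmem : (b, cs) ∈ bible_data := by
      simpa using PySem.Dict.mem_items_of_get?_eq_some _ h
    obtain ⟨hndc, Hc⟩ := H (b, cs) hmem hb
    rw [hcont]
    simp only [if_true, Option.getD_some, Option.map_some]
    rw [pvSortChapters_eq cs hndc Hc]
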